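-- pv_equiv track=rewrite | github.com/KarimKabbara00/Music-Library | helper_functions.py | compile_artists
-- ===== SOURCE A (Python) =====
-- def compile_artists(artists):
--     alphabetically_sorted = {}
--     for a in artists:
--
--         if a[0] not in alphabetically_sorted.keys():
--             alphabetically_sorted[a[0]] = []
--
--         if a in alphabetically_sorted[a[0]]:
--             continue
--
--         alphabetically_sorted[a[0]].append(a)
--
--     alphabetically_sorted = dict(sorted(alphabetically_sorted.items()))
--     return alphabetically_sorted
-- ===== SOURCE B (Python) =====
-- def compile_artists(artists):
--     keys = sorted({a[0] for a in artists})
--     result = {}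
--     for key in keys:
--         seen = []
--         for a in artists:
--             if a[0] == key and a not in seen:
--                 seen.append(a)
--         result[key] = seen
--     return result
-- ===== Notes on version B (the rewrite author's own statement) =====
-- stated objective: alternative
-- what changed: B computes the sorted distinct first characters up front and then, per key, makes one dedup scan of the whole list, instead of A's single dict-grouping pass followed by sorting the items.
-- outside the precondition, e.g. on compile_artists(['abba', '']): A raises IndexError, B raises IndexError
import Mathlib
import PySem

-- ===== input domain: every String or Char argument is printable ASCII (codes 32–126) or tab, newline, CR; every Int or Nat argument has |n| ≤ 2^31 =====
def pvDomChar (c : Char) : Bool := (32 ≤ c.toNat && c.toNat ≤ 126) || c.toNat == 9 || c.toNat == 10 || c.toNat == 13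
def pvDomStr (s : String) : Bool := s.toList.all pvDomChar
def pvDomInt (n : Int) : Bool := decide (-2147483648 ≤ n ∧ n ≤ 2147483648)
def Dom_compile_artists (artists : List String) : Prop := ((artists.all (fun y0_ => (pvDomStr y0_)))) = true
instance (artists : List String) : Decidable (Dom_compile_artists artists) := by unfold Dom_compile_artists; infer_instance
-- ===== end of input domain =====

-- B replaces A's single dict-building grouping pass by: sorted distinct first characters, then one dedup
-- scan of the whole list per key (objective: alternative decomposition, same observable result).

-- a[0] as a one-character string (none = IndexError on the empty string; excluded by Pre_)
def pvFirst (a : String) : Option String := (PySem.Str.pyGet? a 0).map (fun c => String.ofList [c])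

-- ===== PORT A =====
def pvStepA (d : PySem.Dict String (List String)) (a : String) : PySem.Dict String (List String) :=
  match pvFirst a with
  | none => d          -- a[0] raises IndexError here; Pre_ excludes this
  | some k =>
    let d1 := if d.contains k then d else d.insert k []      -- if a[0] not in keys: d[a[0]] = []
    let cur := d1.getD k []
    if a ∈ cur then d1                                       -- if a in d[a[0]]: continue
    else d1.insert k (cur ++ [a])                            -- d[a[0]].append(a)

def compile_artists (artists : List String) : List (String × List String) :=
  let d := artists.foldl pvStepA PySem.Dict.empty
  -- dict(sorted(d.items())): dict keys are distinct, so Python's tuple comparison is decided by the key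
  PySem.List.sorted d.items (fun p => p.1)

-- ===== PORT B =====
def pvBucket (artists : List String) (k : String) : List String :=
  artists.foldl (fun seen a => if pvFirst a = some k ∧ a ∉ seen then seen ++ [a] else seen) []

def compile_artists_alt (artists : List String) : List (String × List String) :=
  let keys := PySem.List.sorted (PySem.Set.ofList (artists.filterMap pvFirst)) (fun k => k)
  keys.map (fun k => (k, pvBucket artists k))

-- ===== PRECONDITION & SPEC =====
-- Pre_ excludes lists containing the empty string, on which A raises IndexError (a[0]); B raises there too.
def Pre_compile_artists (artists : List String) : Prop := ∀ a ∈ artists, a ≠ ""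
instance (artists : List String) : Decidable (Pre_compile_artists artists) := by unfold Pre_compile_artists; infer_instance
def pvWitness_compile_artists : List String := ["bowie", "abba", "ant"]

def Spec_compile_artists (artists : List String) (out : List (String × List String)) : Prop := out = compile_artists_alt artists
instance (artists : List String) (out : List (String × List String)) : Decidable (Spec_compile_artists artists out) := by unfold Spec_compile_artists; infer_instance

-- ===== CLAIM (what is proved, stated in full; the proofs are below) =====
def Claim_equal_compile_artists : Prop := ∀ (artists : List String), Dom_compile_artists artists → Pre_compile_artists artists → Spec_compile_artists artists (compile_artists artists)

-- ===== LEMMAS AND PROOFS =====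

theorem pvFirst_isSome (a : String) (h : a ≠ "") : (pvFirst a).isSome := by
  unfold pvFirst
  cases hs : PySem.Str.pyGet? a 0 with
  | some c => rfl
  | none =>
    exfalso
    apply h
    simp [PySem.Str.pyGet?, PySem.Chars.pyGet?, PySem.List.pyGet?, PySem.List.pyIdx?] at hs
    rcases Nat.eq_zero_or_pos a.length with h0 | h0
    · exact String.length_eq_zero_iff.mp h0
    · exact hs h0

-- the setdefault step 'if a[0] not in keys: d[a[0]] = []' changes no lookup
theorem pvd1_getD (d : PySem.Dict String (List String)) (ka : String) :
    ∀ j, (if d.contains ka then d else d.insert ka []).getD j [] = d.getD j [] := by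
  intro j
  split
  · rfl
  · rename_i hc
    rw [PySem.Dict.getD_insert]
    split
    · rename_i hj
      subst hj
      exact (PySem.Dict.getD_of_not_contains d [] (by simpa using hc)).symm
    · rfl

theorem pvStepA_getD (d : PySem.Dict String (List String)) (a : String)
    (h : (pvFirst a).isSome) (k : String) :
    (pvStepA d a).getD k [] =
      (if pvFirst a = some k ∧ a ∉ d.getD k [] then d.getD k [] ++ [a] else d.getD k []) := by
  obtain ⟨ka, hka⟩ := Option.isSome_iff_exists.mp h
  unfold pvStepA
  simp only [hka]
  rw [pvd1_getD d ka ka]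
  by_cases hmem : a ∈ d.getD ka []
  · rw [if_pos hmem, pvd1_getD d ka k, if_neg]
    rintro ⟨h1, h2⟩
    injection h1 with h1
    subst h1
    exact h2 hmem
  · rw [if_neg hmem, PySem.Dict.getD_insert]
    by_cases hk : k = ka
    · subst hk
      rw [if_pos rfl, if_pos ⟨rfl, hmem⟩]
    · rw [if_neg hk, pvd1_getD d ka k, if_neg]
      rintro ⟨h1, -⟩
      injection h1 with h1
      exact hk h1.symm

theorem pvStepA_keys (d : PySem.Dict String (List String)) (a k : String)
    (h : pvFirst a = some k) : (pvStepA d a).keys = PySem.Set.add d.keys k := by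
  unfold pvStepA
  simp only [h]
  have hck : PySem.Set.add d.keys k = if d.contains k then d.keys else d.keys ++ [k] := by
    simp [PySem.Set.add, PySem.Set.contains, PySem.Dict.contains_eq_decide_mem_keys]
  rw [hck]
  by_cases hc : d.contains k
  · simp only [if_pos hc]
    split
    · rfl
    · exact PySem.Dict.keys_insert_of_contains d _ hc
  · have hc' : d.contains k = false := by simpa using hc
    simp only [hc', Bool.false_eq_true, if_false]
    split
    · exact PySem.Dict.keys_insert_of_not_contains d [] hc'
    · rw [PySem.Dict.keys_insert_of_contains _ _ (PySem.Dict.contains_insert_self d k []),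
          PySem.Dict.keys_insert_of_not_contains d [] hc']

theorem pvStepA_nodup (d : PySem.Dict String (List String)) (a : String)
    (h : d.keys.Nodup) : (pvStepA d a).keys.Nodup := by
  unfold pvStepA
  split
  · exact h
  · rename_i k hk
    split
    · dsimp only
      split
      · exact h
      · exact PySem.Dict.nodup_keys_insert _ _ _ h
    · have h2 := PySem.Dict.nodup_keys_insert d k [] h
      dsimp only
      split
      · exact h2
      · exact PySem.Dict.nodup_keys_insert _ _ _ h2

theorem foldA_getD (l : List String) (d : PySem.Dict String (List String))
    (h : ∀ a ∈ l, (pvFirst a).isSome) (k : String) :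
    (l.foldl pvStepA d).getD k [] =
      l.foldl (fun seen a => if pvFirst a = some k ∧ a ∉ seen then seen ++ [a] else seen) (d.getD k []) := by
  induction l generalizing d with
  | nil => rfl
  | cons a t ih =>
    simp only [List.foldl_cons]
    rw [ih _ (fun x hx => h x (List.mem_cons_of_mem _ hx)),
        pvStepA_getD d a (h a (List.mem_cons_self)) k]

theorem foldA_keys (l : List String) (d : PySem.Dict String (List String))
    (h : ∀ a ∈ l, (pvFirst a).isSome) :
    (l.foldl pvStepA d).keys = (l.filterMap pvFirst).foldl PySem.Set.add d.keys := by
  induction l generalizing d with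
  | nil => rfl
  | cons a t ih =>
    obtain ⟨k, hk⟩ := Option.isSome_iff_exists.mp (h a List.mem_cons_self)
    simp only [List.foldl_cons, List.filterMap_cons, hk]
    rw [ih _ (fun x hx => h x (List.mem_cons_of_mem _ hx)), pvStepA_keys d a k hk]

theorem foldA_nodup (l : List String) (d : PySem.Dict String (List String))
    (h : d.keys.Nodup) : (l.foldl pvStepA d).keys.Nodup := by
  induction l generalizing d with
  | nil => exact h
  | cons a t ih => exact ih _ (pvStepA_nodup d a h)

-- sorting key/value pairs by their (distinct) keys = sorting the keys, then pairing
theorem sorted_map_pair {g : String → List String} (l : List String) (hnd : l.Nodup) :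
    PySem.List.sorted (l.map (fun k => (k, g k))) (fun p => p.1) =
      (PySem.List.sorted l (fun k => k)).map (fun k => (k, g k)) := by
  apply PySem.List.sorted_eq_of_perm_of_pairwise_lt
  · exact (PySem.List.sorted_perm l (fun k => k) false).map _
  · rw [List.pairwise_map]
    have hle := PySem.List.sorted_pairwise l (fun k => k)
    have hne : (PySem.List.sorted l (fun k => k)).Nodup :=
      (PySem.List.sorted_perm l (fun k => k) false).nodup_iff.mpr hnd
    exact (hle.and hne).imp (fun h => lt_of_le_of_ne h.1 h.2)

-- ===== VERDICT (by name: the statement is the Claim_ definition above) =====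
theorem compile_artists_spec : Claim_equal_compile_artists := by
  intro artists _ hpre
  unfold Spec_compile_artists
  simp only [compile_artists, compile_artists_alt]
  have hs : ∀ a ∈ artists, (pvFirst a).isSome := fun a ha => pvFirst_isSome a (hpre a ha)
  have hnd : (artists.foldl pvStepA PySem.Dict.empty).keys.Nodup :=
    foldA_nodup _ _ PySem.Dict.nodup_keys_empty
  rw [PySem.Dict.items_eq_map_keys _ hnd []]
  have hkeys : (artists.foldl pvStepA PySem.Dict.empty).keys
      = PySem.Set.ofList (artists.filterMap pvFirst) := by
    rw [foldA_keys _ _ hs, PySem.Set.ofList_eq_foldl]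
    rfl
  have hget : ∀ k, (artists.foldl pvStepA PySem.Dict.empty).getD k [] = pvBucket artists k := by
    intro k
    rw [foldA_getD _ _ hs k]
    rfl
  rw [List.map_congr_left (fun k _ => by rw [hget k]), hkeys]
  exact sorted_map_pair _ (PySem.Set.nodup_ofList _)
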